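-- pv_equiv track=rewrite | github.com/hugo-esquer/runtrack-python | jour04/job14/main.py | decouper_chaine
-- ===== SOURCE A (Python) =====
-- def long(chaine): #fonction pour calculer la longuer d'une chaine
--     count=0
--     for i in chaine:
--         count+=1
--     return count
--
-- def decouper_chaine(chiffre, chaine):
--     decoupe = []                     # liste de mots de la phrase
--     debut = 0                        # début du mot
--     longueur_chaine = long(chaine)   # taille de la phrase
--     nouvelle_phrase =""              # phrase sans les mots trop petit
--     i=0
--
--     while i < longueur_chaine:                  # extraire les mots en liste
--         if chaine[i] == " " or chaine[i] == ",":# pour chaque espace ou , selectionner le mot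
--             decoupe += [chaine[debut:i]]
--             debut = i+1                         # mettre a jour le début su prochain mot
--         i+=1
--     decoupe += [chaine[debut:]]                 # ajout du dernier mot de la phrase
--
--     for i in decoupe:                           #retrait des mots inferieur a chiffre
--         if long(i) > chiffre:
--             nouvelle_phrase += i + " "
--     return nouvelle_phrase
-- ===== SOURCE B (Python) =====
-- def decouper_chaine(chiffre, chaine):
--     # One pass over the characters: build the current word char by char,
--     # emit it (with a trailing space) as soon as a delimiter or the end is reached.
--     res = []
--     cur = []
--     for c in chaine:
--         if c == " " or c == ",":
--             if len(cur) > chiffre: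
--                 res.append("".join(cur))
--                 res.append(" ")
--             cur = []
--         else:
--             cur.append(c)
--     if len(cur) > chiffre:
--         res.append("".join(cur))
--         res.append(" ")
--     return "".join(res)
-- ===== Notes on version B (the rewrite author's own statement) =====
-- stated objective: alternative
-- what changed: Replaces A's two passes (index/slice while-loop building a list of all words, then a filter loop over that list) by a single character-by-character scan that accumulates the current word and emits it immediately at each delimiter or at the end, never building the word list.
import Mathlib
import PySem

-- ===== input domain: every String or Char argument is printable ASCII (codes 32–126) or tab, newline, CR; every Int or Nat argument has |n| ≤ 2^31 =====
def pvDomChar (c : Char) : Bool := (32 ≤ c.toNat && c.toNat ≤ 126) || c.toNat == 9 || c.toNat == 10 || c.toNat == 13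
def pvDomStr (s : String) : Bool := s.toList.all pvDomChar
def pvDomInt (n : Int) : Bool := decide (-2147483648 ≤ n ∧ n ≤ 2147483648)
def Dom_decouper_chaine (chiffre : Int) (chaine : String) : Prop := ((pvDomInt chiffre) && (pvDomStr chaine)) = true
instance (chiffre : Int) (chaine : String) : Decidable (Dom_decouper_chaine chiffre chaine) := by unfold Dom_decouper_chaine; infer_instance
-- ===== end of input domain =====

-- B replaces A's two passes (split into a word list, then filter) by one scan that
-- accumulates the current word and emits it at each delimiter / at the end (objective: alternative).

-- ===== PORT A =====
-- long(chaine): counts the characters by a loop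
def longA (s : List Char) : Int := s.foldl (fun count _ => count + 1) 0

-- the while loop of A, state (decoupe, debut), i counts up to the length.
-- chaine[i] with 0 ≤ i < len is s[i]; the slice chaine[debut:i] with 0 ≤ debut ≤ i is
-- (s.take i).drop debut — exact here since both indices are in range and non-negative.
def loopA (s : List Char) (dec : List (List Char)) (debut i : Nat) :
    List (List Char) × Nat :=
  if h : i < s.length then
    if s[i] = ' ' ∨ s[i] = ',' then
      loopA s (dec ++ [(s.take i).drop debut]) (i + 1) (i + 1)
    else
      loopA s dec debut (i + 1)
  else (dec, debut)
termination_by s.length - i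

-- long(chaine) computes the length of chaine; the loop bound is ported as s.length.
def decouper_chaine (chiffre : Int) (chaine : String) : String :=
  let s := chaine.toList
  let r := loopA s [] 0 0
  let decoupe := r.1 ++ [s.drop r.2]      -- decoupe += [chaine[debut:]]
  String.mk (decoupe.foldl
    (fun acc w => if longA w > chiffre then acc ++ w ++ [' '] else acc) [])

-- ===== PORT B =====
def emitB (chiffre : Int) (cur : List Char) : List Char :=
  if (cur.length : Int) > chiffre then cur ++ [' '] else []

def scanB (chiffre : Int) (cur : List Char) : List Char → List Char
  | [] => emitB chiffre cur
  | c :: rest =>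
    if c = ' ' ∨ c = ',' then emitB chiffre cur ++ scanB chiffre [] rest
    else scanB chiffre (cur ++ [c]) rest

def decouper_chaine_alt (chiffre : Int) (chaine : String) : String :=
  String.mk (scanB chiffre [] chaine.toList)

-- ===== PRECONDITION & SPEC =====
def Spec_decouper_chaine (chiffre : Int) (chaine : String) (out : String) : Prop := out = decouper_chaine_alt chiffre chaine
instance (chiffre : Int) (chaine : String) (out : String) : Decidable (Spec_decouper_chaine chiffre chaine out) := by unfold Spec_decouper_chaine; infer_instance

-- ===== CLAIM (what is proved, stated in full; the proofs are below) =====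
def Claim_equal_decouper_chaine : Prop := ∀ (chiffre : Int) (chaine : String), Dom_decouper_chaine chiffre chaine → Spec_decouper_chaine chiffre chaine (decouper_chaine chiffre chaine)

-- ===== LEMMAS AND PROOFS =====

lemma longA_eq (s : List Char) : longA s = (s.length : Int) := by
  unfold longA
  suffices h : ∀ (a : Int), s.foldl (fun count _ => count + 1) a = a + s.length by
    simpa using h 0
  induction s with
  | nil => intro a; simp
  | cons c t ih => intro a; simp [List.foldl, ih]; ring

def filtA (chiffre : Int) (l : List (List Char)) : List Char :=
  l.foldl (fun acc w => if longA w > chiffre then acc ++ w ++ [' '] else acc) []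

lemma filtA_acc (chiffre : Int) (l : List (List Char)) :
    ∀ acc, l.foldl (fun acc w => if longA w > chiffre then acc ++ w ++ [' '] else acc) acc
      = acc ++ filtA chiffre l := by
  induction l with
  | nil => intro acc; simp [filtA]
  | cons w t ih =>
    intro acc
    simp only [filtA, List.foldl]
    rw [ih, ih]
    split_ifs <;> simp
lemma filtA_append (chiffre : Int) (l : List (List Char)) (w : List Char) :
    filtA chiffre (l ++ [w]) = filtA chiffre l ++ emitB chiffre w := by
  unfold filtA
  rw [List.foldl_append]
  rw [filtA_acc]
  simp [filtA, emitB, longA_eq]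

lemma loopA_key (chiffre : Int) (s : List Char) :
    ∀ n i debut dec, s.length - i ≤ n → debut ≤ i →
      (let r := loopA s dec debut i
       filtA chiffre (r.1 ++ [s.drop r.2]))
      = filtA chiffre dec ++ scanB chiffre ((s.take i).drop debut) (s.drop i) := by
  intro n
  induction n with
  | zero =>
    intro i debut dec hn hdi
    have hle : s.length ≤ i := by omega
    rw [loopA]
    simp only [dif_neg (by omega : ¬ i < s.length)]
    rw [List.take_of_length_le hle, List.drop_eq_nil_of_le hle]
    rw [filtA_append]
    rfl
  | succ n ih =>
    intro i debut dec hn hdi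
    by_cases h : i < s.length
    · have hdrop : s.drop i = s[i] :: s.drop (i + 1) := List.drop_eq_getElem_cons h
      rw [loopA]
      simp only [dif_pos h]
      by_cases hsep : s[i] = ' ' ∨ s[i] = ','
      · rw [if_pos hsep, ih (i+1) (i+1) _ (by omega) (le_refl _)]
        rw [filtA_append, hdrop]
        have hcur : (s.take (i+1)).drop (i+1) = [] := by
          apply List.drop_eq_nil_of_le; simp
        rw [hcur]
        rw [show scanB chiffre ((s.take i).drop debut) (s[i] :: s.drop (i+1))
              = emitB chiffre ((s.take i).drop debut) ++ scanB chiffre [] (s.drop (i+1)) by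
            simp [scanB, if_pos hsep]]
        ac_rfl
      · rw [if_neg hsep, ih (i+1) debut dec (by omega) (by omega)]
        rw [hdrop]
        have htake : (s.take (i+1)).drop debut = (s.take i).drop debut ++ [s[i]] := by
          rw [List.take_succ, List.getElem?_eq_getElem h]
          rw [List.drop_append_of_le_length]
          · simp
          · simp; omega
        rw [htake]
        rw [show scanB chiffre ((s.take i).drop debut) (s[i] :: s.drop (i+1))
              = scanB chiffre ((s.take i).drop debut ++ [s[i]]) (s.drop (i+1)) by
            simp [scanB, if_neg hsep]]
    · rw [loopA]
      simp only [dif_neg h]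
      have hle : s.length ≤ i := by omega
      rw [List.take_of_length_le hle, List.drop_eq_nil_of_le hle]
      rw [filtA_append]
      rfl

-- ===== VERDICT (by name: the statement is the Claim_ definition above) =====
theorem decouper_chaine_spec : Claim_equal_decouper_chaine := by
  intro chiffre chaine _
  show decouper_chaine chiffre chaine = decouper_chaine_alt chiffre chaine
  have key := loopA_key chiffre chaine.toList chaine.toList.length 0 0 []
    (by omega) (by omega)
  simp only [List.take_zero, List.drop_nil, List.drop_zero] at key
  unfold decouper_chaine decouper_chaine_alt
  show String.mk (filtA chiffre ((loopA chaine.toList [] 0 0).1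
        ++ [chaine.toList.drop (loopA chaine.toList [] 0 0).2]))
      = String.mk (scanB chiffre [] chaine.toList)
  rw [key]
  rfl
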